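-- pv_equiv track=rewrite | github.com/justin-qu/Meta_Coding_Challenges | Level 1/Uniform_Integers.py | getUniformIntegerCountInInterval
-- ===== SOURCE A (Python) =====
-- def getUniformIntegerCountInInterval(A: int, B: int) -> int:
--     first_uniform_int_id = 0
--     last_uniform_int_id  = 0
--
--     ## Convert integer to list of digits
--     integer_digits = []
--     while A > 0:
--         integer_digits.append(A % 10)
--         A = A // 10
--
--     ## Loop through digits from left to right
--     first_digit = integer_digits[-1]
--     for i in range(len(integer_digits) - 2, -1, -1):
--         ## The uniform integer is greater than A
--         if integer_digits[i] < first_digit: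
--             break
--
--         ## The uniform integer is less than A
--         if integer_digits[i] > first_digit:
--             first_digit += 1
--             break
--
--     ## Map uniform integer to its counting ID
--     first_uniform_int_id = (9 * (len(integer_digits) - 1)) + first_digit
--
--     ## Convert integer to list of digits
--     integer_digits = []
--     while B > 0:
--         integer_digits.append(B % 10)
--         B = B // 10
--
--     ## Loop through digits from left to right
--     first_digit = integer_digits[-1]
--     for i in range(len(integer_digits) - 2, -1, -1):
--         ## The uniform integer is less than B
--         if integer_digits[i] > first_digit:
--             break
--
--         ## The uniform integer is greater than B
--         if integer_digits[i] < first_digit: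
--             first_digit -= 1
--             break
--
--     ## Map uniform integer to its counting ID
--     last_uniform_int_id = (9 * (len(integer_digits) - 1)) + first_digit
--
--     return last_uniform_int_id - first_uniform_int_id + 1
-- ===== SOURCE B (Python) =====
-- def getUniformIntegerCountInInterval(A: int, B: int) -> int:
--     ## For each bound: count digits d and keep the leading digit by repeated division,
--     ## then pick the nearest uniform integer with ONE numeric comparison against the
--     ## d-digit repunit, instead of A's per-digit scan loop.
--
--     n = A
--     d = 0
--     lead = 0
--     while n > 0:
--         lead = n % 10
--         n //= 10
--         d += 1
--     r = (10 ** d - 1) // 9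
--     ## ID of the smallest uniform integer >= A
--     first_id = 9 * (d - 1) + (lead if r * lead >= A else lead + 1)
--
--     n = B
--     d = 0
--     lead = 0
--     while n > 0:
--         lead = n % 10
--         n //= 10
--         d += 1
--     r = (10 ** d - 1) // 9
--     ## ID of the largest uniform integer <= B
--     last_id = 9 * (d - 1) + (lead if r * lead <= B else lead - 1)
--
--     return last_id - first_id + 1
-- ===== Notes on version B (the rewrite author's own statement) =====
-- stated objective: simpler
-- what changed: A maps each bound to its nearest uniform integer by a left-to-right per-digit scan loop with breaks; B keeps only a digit count and the leading digit from the division loop and replaces the scan by a single numeric comparison of the bound against repunit*leading-digit.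
import Mathlib
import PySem

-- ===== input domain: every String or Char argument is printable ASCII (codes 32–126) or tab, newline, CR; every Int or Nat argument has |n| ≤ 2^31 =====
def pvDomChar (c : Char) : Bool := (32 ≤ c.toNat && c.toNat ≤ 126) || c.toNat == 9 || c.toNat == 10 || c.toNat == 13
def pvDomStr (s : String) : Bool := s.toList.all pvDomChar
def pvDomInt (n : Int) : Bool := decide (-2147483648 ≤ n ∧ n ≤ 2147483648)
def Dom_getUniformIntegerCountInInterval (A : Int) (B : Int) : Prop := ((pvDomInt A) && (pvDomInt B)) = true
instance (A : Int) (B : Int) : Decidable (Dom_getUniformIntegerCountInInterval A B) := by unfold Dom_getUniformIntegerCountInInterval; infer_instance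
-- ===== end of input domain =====

-- B replaces A's per-digit scan loop (with breaks) by one numeric comparison of the bound
-- against repunit * leading digit; both keep the while-loop digit extraction (objective: simpler).

-- ===== PORT A =====

/-- `integer_digits = []; while n > 0: integer_digits.append(n % 10); n //= 10` —
    the digit list, least significant first. -/
def pvDigits (n : Int) : List Int :=
  if _h : 0 < n then PySem.Int.mod n 10 :: pvDigits (PySem.Int.floordiv n 10) else []
termination_by n.toNat
decreasing_by
  rw [PySem.Int.floordiv_eq_ediv_of_pos (by omega : (0:Int) < 10)]
  omega

/-- A's `for i in range(len(digits)-2, -1, -1)` loop with its two `break`s,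
    for the lower bound (`first_digit` may be bumped UP). -/
def pvScanUp (digits : List Int) (first : Int) : List Int → Int
  | [] => first
  | i :: rest =>
    match PySem.List.pyGet? digits i with
    | none => first  -- unreachable: every i produced by the range is a valid index
    | some d =>
      if d < first then first
      else if d > first then first + 1
      else pvScanUp digits first rest

/-- Same loop for the upper bound (`first_digit` may be bumped DOWN). -/
def pvScanDown (digits : List Int) (first : Int) : List Int → Int
  | [] => first
  | i :: rest =>
    match PySem.List.pyGet? digits i with
    | none => first  -- unreachable
    | some d =>
      if d > first then first
      else if d < first then first - 1
      else pvScanDown digits first rest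

/-- First half of A: `first_uniform_int_id`. -/
def pvUpId (n : Int) : Int :=
  match PySem.List.pyGet? (pvDigits n) (-1) with
  | none => 0  -- Python raises IndexError here (n ≤ 0); excluded by Pre_
  | some f =>
    9 * (((pvDigits n).length : Int) - 1) +
      pvScanUp (pvDigits n) f (PySem.List.pyRange (((pvDigits n).length : Int) - 2) (-1) (-1))

/-- Second half of A: `last_uniform_int_id`. -/
def pvDownId (n : Int) : Int :=
  match PySem.List.pyGet? (pvDigits n) (-1) with
  | none => 0  -- Python raises IndexError here (n ≤ 0); excluded by Pre_
  | some f =>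
    9 * (((pvDigits n).length : Int) - 1) +
      pvScanDown (pvDigits n) f (PySem.List.pyRange (((pvDigits n).length : Int) - 2) (-1) (-1))

def getUniformIntegerCountInInterval (A : Int) (B : Int) : Int :=
  pvDownId B - pvUpId A + 1

-- ===== PORT B =====

/-- B's `while n > 0: lead = n % 10; n //= 10; d += 1` loop (state `(d, lead)`). -/
def pvInfo (n : Int) (d : Int) (lead : Int) : Int × Int :=
  if h : 0 < n then pvInfo (PySem.Int.floordiv n 10) (d + 1) (PySem.Int.mod n 10) else (d, lead)
termination_by n.toNat
decreasing_by
  rw [PySem.Int.floordiv_eq_ediv_of_pos (by omega : (0:Int) < 10)]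
  omega

/-- B: id of the smallest uniform integer ≥ n; `10 ** d` has `d ≥ 0` always, so `.toNat` is exact. -/
def pvUpIdAlt (n : Int) : Int :=
  9 * ((pvInfo n 0 0).1 - 1) +
    (if PySem.Int.floordiv (10 ^ (pvInfo n 0 0).1.toNat - 1) 9 * (pvInfo n 0 0).2 ≥ n
     then (pvInfo n 0 0).2 else (pvInfo n 0 0).2 + 1)

/-- B: id of the largest uniform integer ≤ n. -/
def pvDownIdAlt (n : Int) : Int :=
  9 * ((pvInfo n 0 0).1 - 1) +
    (if PySem.Int.floordiv (10 ^ (pvInfo n 0 0).1.toNat - 1) 9 * (pvInfo n 0 0).2 ≤ n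
     then (pvInfo n 0 0).2 else (pvInfo n 0 0).2 - 1)

def getUniformIntegerCountInInterval_alt (A : Int) (B : Int) : Int :=
  pvDownIdAlt B - pvUpIdAlt A + 1

-- ===== PRECONDITION & SPEC =====
-- Pre_ excludes exactly the inputs on which the Python A raises IndexError
-- (`integer_digits[-1]` on an empty digit list, i.e. a non-positive bound).
def Pre_getUniformIntegerCountInInterval (A : Int) (B : Int) : Prop := 1 ≤ A ∧ 1 ≤ B
instance (A : Int) (B : Int) : Decidable (Pre_getUniformIntegerCountInInterval A B) := by
  unfold Pre_getUniformIntegerCountInInterval; infer_instance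

def pvWitness_getUniformIntegerCountInInterval : Int × Int := (5, 27)

def Spec_getUniformIntegerCountInInterval (A : Int) (B : Int) (out : Int) : Prop := out = getUniformIntegerCountInInterval_alt A B
instance (A : Int) (B : Int) (out : Int) : Decidable (Spec_getUniformIntegerCountInInterval A B out) := by unfold Spec_getUniformIntegerCountInInterval; infer_instance

-- ===== CLAIM (what is proved, stated in full; the proofs are below) =====
def Claim_equal_getUniformIntegerCountInInterval : Prop := ∀ (A : Int) (B : Int), Dom_getUniformIntegerCountInInterval A B → Pre_getUniformIntegerCountInInterval A B → Spec_getUniformIntegerCountInInterval A B (getUniformIntegerCountInInterval A B)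

-- ===== LEMMAS AND PROOFS =====

/-- Repunit 0, 1, 11, 111, … -/
def pvRep : Nat → Int
  | 0 => 0
  | k + 1 => 10 * pvRep k + 1

/-- Value of a digit list written most significant first. -/
def pvValM : List Int → Int
  | [] => 0
  | d :: t => d * 10 ^ t.length + pvValM t

theorem pvRep_nine (k : Nat) : 9 * pvRep k = 10 ^ k - 1 := by
  induction k with
  | zero => simp [pvRep]
  | succ k ih => simp only [pvRep, pow_succ]; linarith

theorem pvRep_succ (k : Nat) : pvRep (k + 1) = 10 ^ k + pvRep k := by
  have := pvRep_nine k
  simp only [pvRep]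
  linarith

theorem pvDigits_pos (n : Int) (h : 0 < n) :
    pvDigits n = PySem.Int.mod n 10 :: pvDigits (PySem.Int.floordiv n 10) := by
  rw [pvDigits]; simp [h]

theorem pvDigits_nonpos (n : Int) (h : ¬ 0 < n) : pvDigits n = [] := by
  rw [pvDigits]; simp [h]

theorem pvDigits_mem (n : Int) : ∀ d ∈ pvDigits n, 0 ≤ d ∧ d < 10 := by
  induction n using pvDigits.induct with
  | case1 n h ih =>
    rw [pvDigits_pos n h]
    intro d hd
    rcases List.mem_cons.mp hd with h1 | h1
    · subst h1
      exact ⟨PySem.Int.mod_nonneg _ (by omega), PySem.Int.mod_lt _ (by omega)⟩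
    · exact ih d h1
  | case2 n h => rw [pvDigits_nonpos n h]; simp

theorem pvDigits_ne_nil (n : Int) (h : 0 < n) : pvDigits n ≠ [] := by
  rw [pvDigits_pos n h]; simp

theorem pvValM_append (L : List Int) (d : Int) : pvValM (L ++ [d]) = 10 * pvValM L + d := by
  induction L with
  | nil => simp [pvValM]
  | cons x t ih =>
    simp only [List.cons_append, pvValM, List.length_append, List.length_cons,
      List.length_nil, ih, pow_succ]
    ring

theorem pvValM_digits (n : Int) : 0 ≤ n → pvValM (pvDigits n).reverse = n := by
  induction n using pvDigits.induct with
  | case1 n h ih =>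
    intro _
    rw [pvDigits_pos n h]
    have h10 : (0:Int) < 10 := by omega
    have hd : 0 ≤ PySem.Int.floordiv n 10 := by
      rw [PySem.Int.floordiv_eq_ediv_of_pos h10]; omega
    simp only [List.reverse_cons, pvValM_append, ih hd]
    have := PySem.Int.floordiv_mul_add_mod n 10
    omega
  | case2 n h =>
    intro h0
    rw [pvDigits_nonpos n h]
    simp only [List.reverse_nil, pvValM]
    omega

theorem pvValM_bounds (L : List Int) (hL : ∀ d ∈ L, 0 ≤ d ∧ d < 10) :
    0 ≤ pvValM L ∧ pvValM L < 10 ^ L.length := by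
  induction L with
  | nil => simp [pvValM]
  | cons d t ih =>
    have hd := hL d (by simp)
    have ht := ih (fun x hx => hL x (by simp [hx]))
    have hp : (0:Int) < 10 ^ t.length := by positivity
    simp only [pvValM, List.length_cons, pow_succ]
    constructor
    · nlinarith [hd.1, ht.1]
    · nlinarith [hd.2, ht.2]

theorem pvInfo_eq (n : Int) :
    ∀ d l, pvInfo n d l = (d + ((pvDigits n).length : Int), (pvDigits n).getLastD l) := by
  induction n using pvDigits.induct with
  | case1 n h ih =>
    intro d l
    rw [pvInfo]
    simp only [dif_pos h, ih]
    simp only [pvDigits_pos n h, List.length_cons, List.getLastD_cons, Prod.mk.injEq]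
    refine ⟨by push_cast; ring, trivial⟩
  | case2 n h =>
    intro d l
    rw [pvInfo]
    simp [h, pvDigits_nonpos n h]

/-- Proof-side structural form of A's upward scan (digits most significant first,
    leading digit removed). -/
def pvScanU : List Int → Int → Int
  | [], f => f
  | d :: t, f => if d < f then f else if d > f then f + 1 else pvScanU t f

def pvScanD : List Int → Int → Int
  | [], f => f
  | d :: t, f => if d > f then f else if d < f then f - 1 else pvScanD t f

/-- The index-driven upward scan over `range(k-1, -1, -1)` is the structural scan of the
    reversed length-`k` prefix. -/
theorem pvScanUp_take (D : List Int) (f : Int) (k : Nat) (hk : k ≤ D.length) :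
    pvScanUp D f (PySem.List.pyRange ((k : Int) - 1) (-1) (-1)) =
      pvScanU ((D.take k).reverse) f := by
  induction k with
  | zero =>
    simp only [Nat.cast_zero, zero_sub]
    rw [PySem.List.pyRange_neg_one_eq_nil (by omega)]
    simp [pvScanUp, pvScanU]
  | succ k ih =>
    have hk' : k ≤ D.length := by omega
    have hkd : k < D.length := by omega
    have ha : ((k + 1 : Nat) : Int) - 1 = (k : Int) := by push_cast; ring
    have hcons := PySem.List.pyRange_neg_one_cons (a := (k : Int)) (b := (-1 : Int)) (by omega)
    have htake : (D.take (k + 1)).reverse = D[k] :: (D.take k).reverse := by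
      rw [List.take_add_one, List.getElem?_eq_getElem hkd]
      simp
    have hget : PySem.List.pyGet? D ((k : Int)) = some D[k] := by
      rw [PySem.List.pyGet?_natCast, List.getElem?_eq_getElem hkd]
    rw [ha, hcons, htake]
    simp only [pvScanUp, hget, pvScanU]
    split_ifs <;> first | rfl | exact ih hk'

theorem pvScanDown_take (D : List Int) (f : Int) (k : Nat) (hk : k ≤ D.length) :
    pvScanDown D f (PySem.List.pyRange ((k : Int) - 1) (-1) (-1)) =
      pvScanD ((D.take k).reverse) f := by
  induction k with
  | zero =>
    simp only [Nat.cast_zero, zero_sub]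
    rw [PySem.List.pyRange_neg_one_eq_nil (by omega)]
    simp [pvScanDown, pvScanD]
  | succ k ih =>
    have hk' : k ≤ D.length := by omega
    have hkd : k < D.length := by omega
    have ha : ((k + 1 : Nat) : Int) - 1 = (k : Int) := by push_cast; ring
    have hcons := PySem.List.pyRange_neg_one_cons (a := (k : Int)) (b := (-1 : Int)) (by omega)
    have htake : (D.take (k + 1)).reverse = D[k] :: (D.take k).reverse := by
      rw [List.take_add_one, List.getElem?_eq_getElem hkd]
      simp
    have hget : PySem.List.pyGet? D ((k : Int)) = some D[k] := by
      rw [PySem.List.pyGet?_natCast, List.getElem?_eq_getElem hkd]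
    rw [ha, hcons, htake]
    simp only [pvScanDown, hget, pvScanD]
    split_ifs <;> first | rfl | exact ih hk'

/-- A's upward scan result as one numeric comparison against the repunit. -/
theorem pvScanU_spec (L : List Int) (f : Int) (hL : ∀ d ∈ L, 0 ≤ d ∧ d < 10)
    (hf0 : 0 ≤ f) (hf9 : f ≤ 9) :
    pvScanU L f = if pvRep L.length * f ≥ pvValM L then f else f + 1 := by
  induction L with
  | nil => simp [pvScanU, pvValM, pvRep]
  | cons d t ih =>
    have hd := hL d (by simp)
    have ht : ∀ x ∈ t, 0 ≤ x ∧ x < 10 := fun x hx => hL x (by simp [hx])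
    have hb := pvValM_bounds t ht
    have h9 := pvRep_nine t.length
    have hP : (0:Int) < 10 ^ t.length := by positivity
    have hR0 : 0 ≤ pvRep t.length := by linarith
    have hRf0 : 0 ≤ pvRep t.length * f := mul_nonneg hR0 hf0
    have hRf9 : pvRep t.length * f ≤ 10 ^ t.length - 1 := by nlinarith
    simp only [pvScanU, pvValM, List.length_cons, pvRep_succ]
    rcases lt_trichotomy d f with hc | hc | hc
    · rw [if_pos hc, if_pos]
      nlinarith [hb.1, hb.2]
    · subst hc
      rw [if_neg (by omega), if_neg (by omega), ih ht]
      have hiff : (10 ^ t.length + pvRep t.length) * d ≥ d * 10 ^ t.length + pvValM t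
          ↔ pvRep t.length * d ≥ pvValM t := by
        constructor <;> intro h <;> nlinarith
      rcases Classical.em (pvRep t.length * d ≥ pvValM t) with h | h
      · rw [if_pos h, if_pos (hiff.mpr h)]
      · rw [if_neg h, if_neg (fun hh => h (hiff.mp hh))]
    · rw [if_neg (by omega), if_pos hc, if_neg]
      push Not
      nlinarith [hb.1, hb.2]

/-- A's downward scan result as one numeric comparison against the repunit. -/
theorem pvScanD_spec (L : List Int) (f : Int) (hL : ∀ d ∈ L, 0 ≤ d ∧ d < 10)
    (hf0 : 0 ≤ f) (hf9 : f ≤ 9) :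
    pvScanD L f = if pvRep L.length * f ≤ pvValM L then f else f - 1 := by
  induction L with
  | nil => simp [pvScanD, pvValM, pvRep]
  | cons d t ih =>
    have hd := hL d (by simp)
    have ht : ∀ x ∈ t, 0 ≤ x ∧ x < 10 := fun x hx => hL x (by simp [hx])
    have hb := pvValM_bounds t ht
    have h9 := pvRep_nine t.length
    have hP : (0:Int) < 10 ^ t.length := by positivity
    have hR0 : 0 ≤ pvRep t.length := by linarith
    have hRf0 : 0 ≤ pvRep t.length * f := mul_nonneg hR0 hf0
    have hRf9 : pvRep t.length * f ≤ 10 ^ t.length - 1 := by nlinarith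
    simp only [pvScanD, pvValM, List.length_cons, pvRep_succ]
    rcases lt_trichotomy d f with hc | hc | hc
    · rw [if_neg (by omega), if_pos hc, if_neg]
      push Not
      nlinarith [hb.1, hb.2]
    · subst hc
      rw [if_neg (by omega), if_neg (by omega), ih ht]
      have hiff : (10 ^ t.length + pvRep t.length) * d ≤ d * 10 ^ t.length + pvValM t
          ↔ pvRep t.length * d ≤ pvValM t := by
        constructor <;> intro h <;> nlinarith
      rcases Classical.em (pvRep t.length * d ≤ pvValM t) with h | h
      · rw [if_pos h, if_pos (hiff.mpr h)]
      · rw [if_neg h, if_neg (fun hh => h (hiff.mp hh))]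
    · rw [if_pos hc, if_pos]
      nlinarith [hb.1, hb.2]

theorem pvUpId_some (n f : Int) (h : PySem.List.pyGet? (pvDigits n) (-1) = some f) :
    pvUpId n = 9 * (((pvDigits n).length : Int) - 1) +
      pvScanUp (pvDigits n) f (PySem.List.pyRange (((pvDigits n).length : Int) - 2) (-1) (-1)) := by
  unfold pvUpId
  rw [h]

theorem pvDownId_some (n f : Int) (h : PySem.List.pyGet? (pvDigits n) (-1) = some f) :
    pvDownId n = 9 * (((pvDigits n).length : Int) - 1) +
      pvScanDown (pvDigits n) f (PySem.List.pyRange (((pvDigits n).length : Int) - 2) (-1) (-1)) := by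
  unfold pvDownId
  rw [h]

theorem pvRepDiv (m : Nat) : PySem.Int.floordiv (10 ^ m - 1) 9 = pvRep m := by
  have h9 := pvRep_nine m
  rw [PySem.Int.floordiv_eq_ediv_of_pos (by omega),
    show (10:Int) ^ m - 1 = 9 * pvRep m by linarith,
    Int.mul_ediv_cancel_left _ (by omega)]

theorem pvUpId_eq (n : Int) (h1 : 1 ≤ n) : pvUpId n = pvUpIdAlt n := by
  have hpos : 0 < n := by omega
  have hne : pvDigits n ≠ [] := pvDigits_ne_nil n hpos
  have hlen : 1 ≤ (pvDigits n).length := List.length_pos_iff.mpr hne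
  have hget : PySem.List.pyGet? (pvDigits n) (-1) = some ((pvDigits n).getLast hne) := by
    rw [PySem.List.pyGet?_neg_one, List.getLast?_eq_some_getLast]
  have hfb := pvDigits_mem n ((pvDigits n).getLast hne) (List.getLast_mem hne)
  have hLmem : ∀ d ∈ (pvDigits n).dropLast.reverse, 0 ≤ d ∧ d < 10 := by
    intro d hd
    exact pvDigits_mem n d (List.dropLast_subset _ (List.mem_reverse.mp hd))
  have hklen : (pvDigits n).dropLast.reverse.length = (pvDigits n).length - 1 := by simp
  have hvn : pvValM ((pvDigits n).getLast hne :: (pvDigits n).dropLast.reverse) = n := by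
    have hrev : (pvDigits n).reverse
        = (pvDigits n).getLast hne :: (pvDigits n).dropLast.reverse := by
      conv_lhs => rw [← List.dropLast_append_getLast hne]
      simp
    rw [← hrev]
    exact pvValM_digits n (by omega)
  have hcast : (((pvDigits n).length : Int) - 2) = (((pvDigits n).length - 1 : Nat) : Int) - 1 := by
    omega
  have hscan : pvScanUp (pvDigits n) ((pvDigits n).getLast hne)
      (PySem.List.pyRange (((pvDigits n).length : Int) - 2) (-1) (-1))
      = pvScanU ((pvDigits n).dropLast.reverse) ((pvDigits n).getLast hne) := by
    rw [hcast, pvScanUp_take _ _ _ (by omega), ← List.dropLast_eq_take]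
  have hinfo : pvInfo n 0 0 = (((pvDigits n).length : Int), (pvDigits n).getLast hne) := by
    rw [pvInfo_eq]
    simp [List.getLastD_eq_getLast?, List.getLast?_eq_some_getLast hne]
  rw [pvUpId_some n _ hget, hscan, pvScanU_spec _ _ hLmem hfb.1 (by omega)]
  unfold pvUpIdAlt
  rw [hinfo]
  simp only [Int.toNat_natCast, pvRepDiv]
  congr 1
  refine if_congr ?_ rfl rfl
  have hmain : ((pvDigits n).getLast hne) * 10 ^ (pvDigits n).dropLast.reverse.length
      + pvValM ((pvDigits n).dropLast.reverse) = n := by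
    simpa [pvValM] using hvn
  have hrepLen : pvRep (pvDigits n).length
      = 10 ^ (pvDigits n).dropLast.reverse.length + pvRep (pvDigits n).dropLast.reverse.length := by
    rw [show (pvDigits n).length = (pvDigits n).dropLast.reverse.length + 1 by omega]
    exact pvRep_succ _
  constructor <;> intro h <;> nlinarith [hmain, hrepLen]

theorem pvDownId_eq (n : Int) (h1 : 1 ≤ n) : pvDownId n = pvDownIdAlt n := by
  have hpos : 0 < n := by omega
  have hne : pvDigits n ≠ [] := pvDigits_ne_nil n hpos
  have hlen : 1 ≤ (pvDigits n).length := List.length_pos_iff.mpr hne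
  have hget : PySem.List.pyGet? (pvDigits n) (-1) = some ((pvDigits n).getLast hne) := by
    rw [PySem.List.pyGet?_neg_one, List.getLast?_eq_some_getLast]
  have hfb := pvDigits_mem n ((pvDigits n).getLast hne) (List.getLast_mem hne)
  have hLmem : ∀ d ∈ (pvDigits n).dropLast.reverse, 0 ≤ d ∧ d < 10 := by
    intro d hd
    exact pvDigits_mem n d (List.dropLast_subset _ (List.mem_reverse.mp hd))
  have hklen : (pvDigits n).dropLast.reverse.length = (pvDigits n).length - 1 := by simp
  have hvn : pvValM ((pvDigits n).getLast hne :: (pvDigits n).dropLast.reverse) = n := by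
    have hrev : (pvDigits n).reverse
        = (pvDigits n).getLast hne :: (pvDigits n).dropLast.reverse := by
      conv_lhs => rw [← List.dropLast_append_getLast hne]
      simp
    rw [← hrev]
    exact pvValM_digits n (by omega)
  have hcast : (((pvDigits n).length : Int) - 2) = (((pvDigits n).length - 1 : Nat) : Int) - 1 := by
    omega
  have hscan : pvScanDown (pvDigits n) ((pvDigits n).getLast hne)
      (PySem.List.pyRange (((pvDigits n).length : Int) - 2) (-1) (-1))
      = pvScanD ((pvDigits n).dropLast.reverse) ((pvDigits n).getLast hne) := by
    rw [hcast, pvScanDown_take _ _ _ (by omega), ← List.dropLast_eq_take]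
  have hinfo : pvInfo n 0 0 = (((pvDigits n).length : Int), (pvDigits n).getLast hne) := by
    rw [pvInfo_eq]
    simp [List.getLastD_eq_getLast?, List.getLast?_eq_some_getLast hne]
  rw [pvDownId_some n _ hget, hscan, pvScanD_spec _ _ hLmem hfb.1 (by omega)]
  unfold pvDownIdAlt
  rw [hinfo]
  simp only [Int.toNat_natCast, pvRepDiv]
  congr 1
  refine if_congr ?_ rfl rfl
  have hmain : ((pvDigits n).getLast hne) * 10 ^ (pvDigits n).dropLast.reverse.length
      + pvValM ((pvDigits n).dropLast.reverse) = n := by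
    simpa [pvValM] using hvn
  have hrepLen : pvRep (pvDigits n).length
      = 10 ^ (pvDigits n).dropLast.reverse.length + pvRep (pvDigits n).dropLast.reverse.length := by
    rw [show (pvDigits n).length = (pvDigits n).dropLast.reverse.length + 1 by omega]
    exact pvRep_succ _
  constructor <;> intro h <;> nlinarith [hmain, hrepLen]

-- ===== VERDICT (by name: the statement is the Claim_ definition above) =====
theorem getUniformIntegerCountInInterval_spec : Claim_equal_getUniformIntegerCountInInterval := by
  intro A B _ hPre
  unfold Spec_getUniformIntegerCountInInterval getUniformIntegerCountInInterval
    getUniformIntegerCountInInterval_alt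
  rw [pvUpId_eq A hPre.1, pvDownId_eq B hPre.2]
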